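-- pv_equiv track=rewrite | github.com/samokw/metropolitan | ingester/src/pipeline/extract.py | _select_statcan_csv_member
-- ===== SOURCE A (Python) =====
-- def _select_statcan_csv_member(namelist: list[str]) -> str | None:
--     """
--     PUMF ZIPs often include Documents/*codebook*.csv; the microdata file is usually pubMMYY.csv.
--     Housing / table ZIPs typically have a single obvious CSV — we still skip codebooks.
--     """
--     csvs = [f for f in namelist if f.lower().endswith(".csv")]
--     if not csvs:
--         return None
--
--     def is_doc_or_meta(path: str) -> bool:
--         pl = path.lower()
--         return (
--             "metadata" in pl
--             or "codebook" in pl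
--             or "/documents/" in pl
--             or pl.startswith("documents/")
--         )
--
--     data_csvs = [f for f in csvs if not is_doc_or_meta(f)]
--     if not data_csvs:
--         data_csvs = csvs
--
--     pub = [f for f in data_csvs if f.rsplit("/", 1)[-1].lower().startswith("pub")]
--     if pub:
--         return sorted(pub)[0]
--     return sorted(data_csvs)[0]
-- ===== SOURCE B (Python) =====
-- def _select_statcan_csv_member(namelist):
--     csvs = [f for f in namelist if f.lower().endswith(".csv")]
--     if not csvs:
--         return None
--
--     def is_doc_or_meta(path):
--         pl = path.lower()
--         return ("metadata" in pl or "codebook" in pl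
--                 or "/documents/" in pl or pl.startswith("documents/"))
--
--     return min(csvs, key=lambda f: (is_doc_or_meta(f),
--                                     not f.rsplit("/", 1)[-1].lower().startswith("pub"),
--                                     f))
-- ===== Notes on version B (the rewrite author's own statement) =====
-- stated objective: simpler
-- what changed: Replaced A's cascade of intermediate filter lists (data_csvs, pub fallback) plus two sorted()[0] calls by a single min() over the CSV names with one lexicographic key tuple (is_doc_or_meta, not pub-basename, path) encoding the whole priority order.
import Mathlib
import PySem

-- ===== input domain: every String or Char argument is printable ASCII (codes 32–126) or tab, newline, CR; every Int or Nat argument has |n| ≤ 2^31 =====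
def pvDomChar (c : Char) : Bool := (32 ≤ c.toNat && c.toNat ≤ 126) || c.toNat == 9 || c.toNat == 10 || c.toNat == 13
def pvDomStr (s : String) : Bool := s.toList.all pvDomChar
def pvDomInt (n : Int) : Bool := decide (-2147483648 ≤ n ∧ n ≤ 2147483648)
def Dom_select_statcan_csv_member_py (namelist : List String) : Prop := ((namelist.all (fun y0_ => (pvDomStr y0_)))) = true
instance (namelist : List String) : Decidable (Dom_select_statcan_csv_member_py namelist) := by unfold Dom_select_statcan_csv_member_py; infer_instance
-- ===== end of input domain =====

-- B replaces A's cascade of filter lists and sorted()[0] calls by a single min() with a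
-- lexicographic (doc-flag, not-pub-flag, path) key: one pass over the CSV names (objective: simpler).

-- shared helpers: both Python versions compute these exact same predicates
def pvIsCsv (f : String) : Bool := PySem.Str.endswith (PySem.Str.lower f) ".csv"

def pvIsDocOrMeta (path : String) : Bool :=
  let pl := PySem.Str.lower path
  PySem.Str.isIn "metadata" pl || PySem.Str.isIn "codebook" pl ||
  PySem.Str.isIn "/documents/" pl || PySem.Str.startswith pl "documents/"

-- f.rsplit("/", 1)[-1]: the segment after the LAST '/'; hand port (no PySem rsplit),
-- exact for the single-character separator "/" with maxsplit=1 and last piece taken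
def pvBasename (f : String) : String :=
  String.ofList ((f.toList.reverse.takeWhile (fun c => c ≠ '/')).reverse)

def pvStartsPub (f : String) : Bool :=
  PySem.Str.startswith (PySem.Str.lower (pvBasename f)) "pub"

-- ===== PORT A =====
-- the cascade after the emptiness guard (A's code, step for step)
def pvSelectFrom (csvs : List String) : String :=
  let dataCsvs := csvs.filter (fun f => !pvIsDocOrMeta f)
  let dataCsvs' := if dataCsvs = [] then csvs else dataCsvs
  let pub := dataCsvs'.filter pvStartsPub
  if pub ≠ [] then (PySem.List.sorted pub (fun x => x) false).headD ""
  else (PySem.List.sorted dataCsvs' (fun x => x) false).headD ""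

def select_statcan_csv_member_py (namelist : List String) : Option String :=
  let csvs := namelist.filter pvIsCsv
  if csvs = [] then none else some (pvSelectFrom csvs)

-- ===== PORT B =====
-- Python's tuple key (is_doc_or_meta(f), not ...startswith("pub"), f), compared lexicographically
def pvKey (f : String) : Bool ×ₗ Bool ×ₗ String :=
  toLex (pvIsDocOrMeta f, toLex (!pvStartsPub f, f))

-- min(csvs, key=pvKey): Python's min keeps the FIRST minimum, hence strict '<' in the fold
def select_statcan_csv_member_py_alt (namelist : List String) : Option String :=
  match namelist.filter pvIsCsv with
  | [] => none
  | c :: rest =>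
      some (rest.foldl (fun best f => if pvKey f < pvKey best then f else best) c)

-- ===== PRECONDITION & SPEC =====
def Spec_select_statcan_csv_member_py (namelist : List String) (out : Option String) : Prop := out = select_statcan_csv_member_py_alt namelist
instance (namelist : List String) (out : Option String) : Decidable (Spec_select_statcan_csv_member_py namelist out) := by unfold Spec_select_statcan_csv_member_py; infer_instance

-- ===== CLAIM (what is proved, stated in full; the proofs are below) =====
def Claim_equal_select_statcan_csv_member_py : Prop := ∀ (namelist : List String), Dom_select_statcan_csv_member_py namelist → Spec_select_statcan_csv_member_py namelist (select_statcan_csv_member_py namelist)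

-- ===== LEMMAS AND PROOFS =====

lemma pvKey_inj {a b : String} (h : pvKey a = pvKey b) : a = b := by
  have := congrArg (fun k : Bool ×ₗ Bool ×ₗ String => (ofLex (ofLex k).2).2) h
  simpa [pvKey] using this

lemma pvKey_le (r y : String)
    (h : pvIsDocOrMeta r = false ∧ pvIsDocOrMeta y = true
       ∨ pvIsDocOrMeta r = pvIsDocOrMeta y ∧
          (pvStartsPub r = true ∧ pvStartsPub y = false
           ∨ pvStartsPub r = pvStartsPub y ∧ r ≤ y)) :
    pvKey r ≤ pvKey y := by
  unfold pvKey
  rcases h with ⟨hr, hy⟩ | ⟨hd, ⟨hr, hy⟩ | ⟨hp, hle⟩⟩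
  · exact le_of_lt (Prod.Lex.lt_iff.mpr (Or.inl (by simp [hr, hy])))
  · exact Prod.Lex.le_iff.mpr (Or.inr ⟨by simp [hd],
      le_of_lt (Prod.Lex.lt_iff.mpr (Or.inl (by simp [hr, hy])))⟩)
  · exact Prod.Lex.le_iff.mpr (Or.inr ⟨by simp [hd],
      Prod.Lex.le_iff.mpr (Or.inr ⟨by simp [hp], hle⟩)⟩)

lemma pvStep_le_left (a x : String) :
    pvKey (if pvKey x < pvKey a then x else a) ≤ pvKey a := by
  split
  · exact le_of_lt ‹_›
  · exact le_rfl

lemma pvStep_le_right (a x : String) :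
    pvKey (if pvKey x < pvKey a then x else a) ≤ pvKey x := by
  split
  · exact le_rfl
  · exact le_of_not_gt ‹_›

lemma pvFold_mem : ∀ (l : List String) (a : String),
    l.foldl (fun best f => if pvKey f < pvKey best then f else best) a ∈ a :: l := by
  intro l
  induction l with
  | nil => intro a; simp
  | cons x t ih =>
    intro a
    simp only [List.foldl_cons]
    rcases List.mem_cons.mp (ih (if pvKey x < pvKey a then x else a)) with h | h
    · rw [h]; split
      · simp
      · simp
    · simp [h]

lemma pvFold_min : ∀ (l : List String) (a y : String), y ∈ a :: l →
    pvKey (l.foldl (fun best f => if pvKey f < pvKey best then f else best) a) ≤ pvKey y := by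
  intro l
  induction l with
  | nil =>
    intro a y hy
    simp only [List.mem_singleton] at hy
    subst hy; simp
  | cons x t ih =>
    intro a y hy
    simp only [List.foldl_cons]
    have hself := ih (if pvKey x < pvKey a then x else a) _ (List.mem_cons_self ..)
    rcases List.mem_cons.mp hy with rfl | hy
    · exact le_trans hself (pvStep_le_left y x)
    · rcases List.mem_cons.mp hy with rfl | hy
      · exact le_trans hself (pvStep_le_right a y)
      · exact ih _ y (List.mem_cons_of_mem _ hy)

lemma pvSortedHead (S : List String) (hS : S ≠ []) :
    (PySem.List.sorted S (fun x => x) false).headD "" ∈ S ∧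
    ∀ y ∈ S, (PySem.List.sorted S (fun x => x) false).headD "" ≤ y := by
  obtain ⟨m, t, hmt⟩ : ∃ m t, PySem.List.sorted S (fun x => x) false = m :: t := by
    cases h : PySem.List.sorted S (fun x => x) false with
    | nil => exact absurd ((PySem.List.sorted_eq_nil_iff S (fun x => x) false).mp h) hS
    | cons m t => exact ⟨m, t, rfl⟩
  rw [hmt]
  refine ⟨?_, ?_⟩
  · have hm : m ∈ PySem.List.sorted S (fun x => x) false := by
      rw [hmt]; exact List.mem_cons_self ..
    exact (PySem.List.mem_sorted S (fun x => x) false m).mp hm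
  · exact PySem.List.key_head_sorted_le S (fun x => x) hmt

-- A's cascade picks an element of csvs that is pvKey-minimal in csvs
lemma pvSelectFrom_spec (csvs : List String) (hne : csvs ≠ []) :
    pvSelectFrom csvs ∈ csvs ∧ ∀ y ∈ csvs, pvKey (pvSelectFrom csvs) ≤ pvKey y := by
  unfold pvSelectFrom
  dsimp only
  by_cases hd : csvs.filter (fun f => !pvIsDocOrMeta f) = []
  · have hall : ∀ f ∈ csvs, pvIsDocOrMeta f = true := by
      intro f hf
      by_contra hc
      have hmf : f ∈ csvs.filter (fun f => !pvIsDocOrMeta f) :=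
        List.mem_filter.mpr ⟨hf, by simp [Bool.not_eq_true] at hc ⊢; exact hc⟩
      simp [hd] at hmf
    rw [if_pos hd]
    by_cases hp : csvs.filter pvStartsPub = []
    · have hallp : ∀ f ∈ csvs, pvStartsPub f = false := by
        intro f hf
        by_contra hc
        have hmf : f ∈ csvs.filter pvStartsPub :=
          List.mem_filter.mpr ⟨hf, by simpa using hc⟩
        simp [hp] at hmf
      rw [if_neg (by simp [hp])]
      obtain ⟨hmem, hmin⟩ := pvSortedHead csvs hne
      refine ⟨hmem, fun y hy => pvKey_le _ _ (Or.inr ⟨?_, Or.inr ⟨?_, hmin y hy⟩⟩)⟩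
      · rw [hall _ hmem, hall _ hy]
      · rw [hallp _ hmem, hallp _ hy]
    · rw [if_pos (by simpa using hp)]
      obtain ⟨hmem, hmin⟩ := pvSortedHead _ hp
      have hmem' := List.mem_filter.mp hmem
      refine ⟨hmem'.1, fun y hy => ?_⟩
      by_cases hpy : pvStartsPub y = true
      · exact pvKey_le _ _ (Or.inr ⟨by rw [hall _ hmem'.1, hall _ hy], Or.inr
          ⟨by rw [hmem'.2, hpy], hmin y (List.mem_filter.mpr ⟨hy, hpy⟩)⟩⟩)
      · exact pvKey_le _ _ (Or.inr ⟨by rw [hall _ hmem'.1, hall _ hy], Or.inl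
          ⟨hmem'.2, by simpa using hpy⟩⟩)
  · rw [if_neg hd]
    have hDsub : ∀ f ∈ csvs.filter (fun f => !pvIsDocOrMeta f),
        f ∈ csvs ∧ pvIsDocOrMeta f = false := by
      intro f hf
      have hmf := List.mem_filter.mp hf
      exact ⟨hmf.1, by simpa using hmf.2⟩
    have hDall : ∀ f ∈ csvs, pvIsDocOrMeta f = false →
        f ∈ csvs.filter (fun f => !pvIsDocOrMeta f) := by
      intro f hf hdf
      exact List.mem_filter.mpr ⟨hf, by simp [hdf]⟩
    by_cases hp : (csvs.filter (fun f => !pvIsDocOrMeta f)).filter pvStartsPub = []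
    · have hallp : ∀ f ∈ csvs.filter (fun f => !pvIsDocOrMeta f), pvStartsPub f = false := by
        intro f hf
        by_contra hc
        have hmf : f ∈ (csvs.filter (fun f => !pvIsDocOrMeta f)).filter pvStartsPub :=
          List.mem_filter.mpr ⟨hf, by simpa using hc⟩
        simp [hp] at hmf
      rw [if_neg (by simp [hp])]
      obtain ⟨hmem, hmin⟩ := pvSortedHead _ hd
      obtain ⟨hmc, hmd⟩ := hDsub _ hmem
      refine ⟨hmc, fun y hy => ?_⟩
      by_cases hdy : pvIsDocOrMeta y = true
      · exact pvKey_le _ _ (Or.inl ⟨hmd, hdy⟩)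
      · have hyD := hDall y hy (by simpa using hdy)
        exact pvKey_le _ _ (Or.inr ⟨by rw [hmd]; simpa using hdy, Or.inr
          ⟨by rw [hallp _ hmem, hallp _ hyD], hmin y hyD⟩⟩)
    · rw [if_pos (by simpa using hp)]
      obtain ⟨hmem, hmin⟩ := pvSortedHead _ hp
      have hmem' := List.mem_filter.mp hmem
      obtain ⟨hmc, hmd⟩ := hDsub _ hmem'.1
      refine ⟨hmc, fun y hy => ?_⟩
      by_cases hdy : pvIsDocOrMeta y = true
      · exact pvKey_le _ _ (Or.inl ⟨hmd, hdy⟩)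
      · have hyD := hDall y hy (by simpa using hdy)
        by_cases hpy : pvStartsPub y = true
        · exact pvKey_le _ _ (Or.inr ⟨by rw [hmd]; simpa using hdy, Or.inr
            ⟨by rw [hmem'.2, hpy], hmin y (List.mem_filter.mpr ⟨hyD, hpy⟩)⟩⟩)
        · exact pvKey_le _ _ (Or.inr ⟨by rw [hmd]; simpa using hdy, Or.inl
            ⟨hmem'.2, by simpa using hpy⟩⟩)

-- ===== VERDICT (by name: the statement is the Claim_ definition above) =====
theorem select_statcan_csv_member_py_spec : Claim_equal_select_statcan_csv_member_py := by
  intro namelist _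
  unfold Spec_select_statcan_csv_member_py select_statcan_csv_member_py select_statcan_csv_member_py_alt
  cases hcs : namelist.filter pvIsCsv with
  | nil => simp
  | cons c rest =>
    rw [if_neg (by simp)]
    have hne : c :: rest ≠ [] := by simp
    obtain ⟨hrmem, hrmin⟩ := pvSelectFrom_spec (c :: rest) hne
    set m := rest.foldl (fun best f => if pvKey f < pvKey best then f else best) c with hm
    have hmmem : m ∈ c :: rest := pvFold_mem rest c
    have hmmin : ∀ y ∈ c :: rest, pvKey m ≤ pvKey y := fun y hy => pvFold_min rest c y hy
    have : pvKey (pvSelectFrom (c :: rest)) = pvKey m :=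
      le_antisymm (hrmin m hmmem) (hmmin _ hrmem)
    exact congrArg some (pvKey_inj this)
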